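-- pv_equiv track=rewrite | github.com/pypi-data/pypi-mirror-182 | packages/dslibrary/dslibrary-0.0.73-py3-none-any.whl/dslibrary/utils/file_utils.py | is_breakout_path
-- ===== SOURCE A (Python) =====
-- def is_breakout_path(path: str) -> bool:
--     """
--     Determine whether a path attempts to 'escape' to its parent or siblings.
--     """
--     level = 0
--     for elem in path.split("/"):
--         if elem in ("", "."):
--             # empty
--             continue
--         if elem == "..":
--             # up
--             level -= 1
--             if level < 0:
--                 return True
--         else:
--             # down
--             level += 1
--     return False
-- ===== SOURCE B (Python) =====
-- def is_breakout_path(path: str) -> bool: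
--     """
--     Determine whether a path attempts to 'escape' to its parent or siblings.
--     """
--     parts = [e for e in path.split("/") if e not in ("", ".")]
--     for i, e in enumerate(parts):
--         if e != "..":
--             continue
--         prefix = parts[:i + 1]
--         ups = prefix.count("..")
--         if ups > len(prefix) - ups:
--             return True
--     return False
-- ===== Notes on version B (the rewrite author's own statement) =====
-- stated objective: alternative
-- what changed: Replaces A's single fused running-counter loop by a brute-force prefix check: for each up-component it recounts the whole prefix ending there and reports breakout if ups outnumber downs in that prefix (no running state is carried).
import Mathlib
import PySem

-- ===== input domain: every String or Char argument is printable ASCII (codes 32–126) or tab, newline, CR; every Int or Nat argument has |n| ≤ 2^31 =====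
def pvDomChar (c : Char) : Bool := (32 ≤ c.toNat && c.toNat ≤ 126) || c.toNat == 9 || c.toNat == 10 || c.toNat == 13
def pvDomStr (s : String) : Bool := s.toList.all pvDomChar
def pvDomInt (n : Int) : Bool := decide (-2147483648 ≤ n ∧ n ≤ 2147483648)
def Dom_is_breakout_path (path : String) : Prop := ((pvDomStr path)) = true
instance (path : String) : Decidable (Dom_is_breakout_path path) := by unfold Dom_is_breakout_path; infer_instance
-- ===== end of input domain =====

-- B replaces A's fused running-counter loop by a brute-force prefix check: for each up
-- ("..") component it recounts the whole prefix ending there (ups vs downs) — no running state.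

-- ===== PORT A =====
-- the for-loop of A: state is `level`; early `return True` becomes returning true
def isBreakoutLoopA : List String → Int → Bool
  | [], _ => false
  | elem :: rest, level =>
    if elem = "" ∨ elem = "." then
      isBreakoutLoopA rest level
    else if elem = ".." then
      if level - 1 < 0 then true else isBreakoutLoopA rest (level - 1)
    else
      isBreakoutLoopA rest (level + 1)

def is_breakout_path (path : String) : Bool :=
  isBreakoutLoopA ((PySem.Str.split? path "/").getD []) 0

-- ===== PORT B =====
-- Source B's for-loop over enumerate(parts) with early return; `parts` is fixed, the loop
-- walks the (index, element) pairs; parts[:i+1] is PySem.List.slice, counts recomputed each time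
def isBreakoutLoopB (parts : List String) : List (Int × String) → Bool
  | [] => false
  | (i, e) :: rest =>
    if e ≠ ".." then
      isBreakoutLoopB parts rest
    else
      let pref := PySem.List.slice parts none (some (i + 1))
      let ups := pref.count ".."
      if ups > pref.length - ups then true else isBreakoutLoopB parts rest

def is_breakout_path_alt (path : String) : Bool :=
  let parts := (((PySem.Str.split? path "/").getD []).filter
    (fun e => ¬ (e = "" ∨ e = ".")))
  isBreakoutLoopB parts (PySem.List.enumerate parts 0)

-- ===== PRECONDITION & SPEC =====
def Spec_is_breakout_path (path : String) (out : Bool) : Prop := out = is_breakout_path_alt path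
instance (path : String) (out : Bool) : Decidable (Spec_is_breakout_path path out) := by unfold Spec_is_breakout_path; infer_instance

-- ===== CLAIM (what is proved, stated in full; the proofs are below) =====
def Claim_equal_is_breakout_path : Prop := ∀ (path : String), Dom_is_breakout_path path → Spec_is_breakout_path path (is_breakout_path path)

-- ===== LEMMAS AND PROOFS =====

-- A's loop restricted to the already-filtered component list
def loopF : List String → Int → Bool
  | [], _ => false
  | e :: rest, level =>
    if e = ".." then
      if level - 1 < 0 then true else loopF rest (level - 1)
    else
      loopF rest (level + 1)

theorem loopA_eq_loopF (es : List String) (level : Int) :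
    isBreakoutLoopA es level
      = loopF (es.filter (fun e => ¬ (e = "" ∨ e = "."))) level := by
  induction es generalizing level with
  | nil => simp [isBreakoutLoopA, loopF]
  | cons e es ih =>
    rw [isBreakoutLoopA]
    by_cases he : e = "" ∨ e = "."
    · rw [if_pos he, List.filter_cons_of_neg (by simp [he])]
      exact ih level
    · rw [if_neg he, List.filter_cons_of_pos (by simp [he]), loopF]
      by_cases hd : e = ".."
      · simp only [if_pos hd]
        by_cases hneg : level - 1 < 0
        · simp [hneg]
        · simp [hneg, ih]
      · simp [hd, ih]

theorem loopF_eq_loopB (rest pre : List String)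
    (h2 : 2 * pre.count ".." ≤ pre.length) :
    loopF rest ((pre.length : Int) - 2 * (pre.count ".." : Int))
      = isBreakoutLoopB (pre ++ rest) (PySem.List.enumerate rest (pre.length : Int)) := by
  induction rest generalizing pre with
  | nil => simp [loopF, PySem.List.enumerate, isBreakoutLoopB]
  | cons e rest ih =>
    rw [PySem.List.enumerate_cons, isBreakoutLoopB]
    have hc : pre.count ".." ≤ pre.length := List.count_le_length
    have hpref : PySem.List.slice (pre ++ e :: rest) none (some ((pre.length : Int) + 1))
        = pre ++ [e] := by
      have : ((pre.length : Int) + 1) = ((pre.length + 1 : Nat) : Int) := by push_cast; ring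
      rw [this, PySem.List.slice_to_natCast]
      rw [show pre.length + 1 = pre.length + 1 from rfl, List.take_append]
      simp
    by_cases hd : e = ".."
    · subst hd
      simp only [ne_eq, not_true_eq_false, if_false, hpref]
      have hcount : (pre ++ [".."]).count ".." = pre.count ".." + 1 := by
        simp [List.count_append]
      have hlen : (pre ++ [".."]).length = pre.length + 1 := by simp
      rw [hcount, hlen, loopF, if_pos rfl]
      by_cases hz : pre.length = 2 * pre.count ".."
      · have hcond : pre.count ".." + 1 > pre.length + 1 - (pre.count ".." + 1) := by omega
        have hcond' : (pre.length : Int) - 2 * (pre.count ".." : Int) - 1 < 0 := by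
          omega
        rw [if_pos hcond', if_pos hcond]
      · have hcond : ¬ (pre.count ".." + 1 > pre.length + 1 - (pre.count ".." + 1)) := by omega
        have hcond' : ¬ ((pre.length : Int) - 2 * (pre.count ".." : Int) - 1 < 0) := by
          omega
        rw [if_neg hcond', if_neg hcond]
        have := ih (pre ++ [".."]) (by rw [hcount, hlen]; omega)
        rw [hcount, hlen] at this
        have harith : (pre.length : Int) - 2 * (pre.count ".." : Int) - 1
            = ((pre.length + 1 : Nat) : Int) - 2 * ((pre.count ".." + 1 : Nat) : Int) := by
          push_cast; ring
        rw [harith, this]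
        simp
    · rw [if_pos (by exact hd), loopF, if_neg hd]
      have hcount : (pre ++ [e]).count ".." = pre.count ".." := by
        simp [List.count_append, hd]
      have hlen : (pre ++ [e]).length = pre.length + 1 := by simp
      have := ih (pre ++ [e]) (by rw [hcount, hlen]; omega)
      rw [hcount, hlen] at this
      have harith : (pre.length : Int) - 2 * (pre.count ".." : Int) + 1
          = ((pre.length + 1 : Nat) : Int) - 2 * ((pre.count ".." : Nat) : Int) := by
        push_cast; ring
      rw [harith, this]
      simp

-- ===== VERDICT (by name: the statement is the Claim_ definition above) =====
theorem is_breakout_path_spec : Claim_equal_is_breakout_path := by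
  intro path _
  unfold Spec_is_breakout_path is_breakout_path is_breakout_path_alt
  rw [loopA_eq_loopF]
  have := loopF_eq_loopB
    (((PySem.Str.split? path "/").getD []).filter (fun e => ¬ (e = "" ∨ e = "."))) []
    (by simp)
  simpa using this
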